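-- pv_equiv track=rewrite | github.com/hitaxim/leetcode-learnings | interview-prep-more/Maximum Points Inside The Square.py | maxPointsInsideSquare
-- ===== SOURCE A (Python) =====
-- from typing import List
--
-- def maxPointsInsideSquare(points: List[List[int]], s: str) -> int:
--     minLens = {}
--     secondMin = float('inf')
--
--     for point, char in zip(points, s):
--         size = max(abs(point[0]), abs(point[1]))
--
--         if char not in minLens:
--             minLens[char] = size
--         elif size < minLens[char]:
--             secondMin = min(minLens[char], secondMin)
--             minLens[char] = size
--         else:
--             secondMin = min(size, secondMin)
--
--     count = 0
--     for len in minLens.values():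
--         if len < secondMin:
--             count += 1
--
--     return count
-- ===== SOURCE B (Python) =====
-- def maxPointsInsideSquare(points, s):
--     pairs = [(max(abs(p[0]), abs(p[1])), c) for p, c in zip(points, s)]
--     pairs.sort(key=lambda pc: pc[0])
--     seen = set()
--     boundary = None
--     for size, c in pairs:
--         if c in seen:
--             boundary = size
--             break
--         seen.add(c)
--     if boundary is None:
--         return len(seen)
--     return len({c for size, c in pairs if size < boundary})
-- ===== Notes on version B (the rewrite author's own statement) =====
-- stated objective: alternative
-- what changed: Replaces A's single-pass dict-of-minima with a running global second-minimum by a sort-then-scan algorithm: sort (size,char) pairs ascending, the first already-seen char in the scan fixes the boundary, then count the distinct chars having an occurrence strictly below it.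
import Mathlib
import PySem

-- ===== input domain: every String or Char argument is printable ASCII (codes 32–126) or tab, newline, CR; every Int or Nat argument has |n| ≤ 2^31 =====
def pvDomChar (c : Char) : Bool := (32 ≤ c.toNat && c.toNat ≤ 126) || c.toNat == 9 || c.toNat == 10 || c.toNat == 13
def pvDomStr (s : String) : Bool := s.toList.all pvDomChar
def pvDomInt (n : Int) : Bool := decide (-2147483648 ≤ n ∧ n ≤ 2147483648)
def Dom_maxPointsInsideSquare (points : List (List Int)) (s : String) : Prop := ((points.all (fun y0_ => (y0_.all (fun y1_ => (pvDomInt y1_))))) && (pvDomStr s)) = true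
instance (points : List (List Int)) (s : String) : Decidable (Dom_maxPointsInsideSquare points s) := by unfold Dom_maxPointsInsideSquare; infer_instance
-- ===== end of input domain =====

-- B is an alternative algorithm: sort the (size, char) pairs ascending, scan with a seen-set —
-- the first repeated char fixes the boundary — then count distinct chars with an occurrence below it.

-- ===== PORT A =====
-- size = max(abs(point[0]), abs(point[1])) — shared by both ports, as both Pythons compute it verbatim
def pvSize (p : List Int) : Int := max |PySem.List.pyGetD p 0 0| |PySem.List.pyGetD p 1 0|

-- loop body of A: state is (minLens, secondMin); secondMin = none plays float('inf')
def pvStepA (acc : PySem.Dict Char Int × Option Int) (x : Int × Char) : PySem.Dict Char Int × Option Int :=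
  if acc.1.contains x.2 = false then (acc.1.insert x.2 x.1, acc.2)
  else if x.1 < acc.1.getD x.2 0 then
    (acc.1.insert x.2 x.1,
     some (match acc.2 with | none => acc.1.getD x.2 0 | some sm => min (acc.1.getD x.2 0) sm))
  else (acc.1, some (match acc.2 with | none => x.1 | some sm => min x.1 sm))

-- len < secondMin (secondMin possibly +inf)
def pvLtInf (v : Int) : Option Int → Bool
  | none => true
  | some sm => decide (v < sm)

def maxPointsInsideSquare (points : List (List Int)) (s : String) : Int :=
  let st := (List.zip points s.toList).foldl (fun acc pc => pvStepA acc (pvSize pc.1, pc.2))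
              (PySem.Dict.empty, none)
  st.1.values.foldl (fun cnt v => if pvLtInf v st.2 then cnt + 1 else cnt) 0

-- ===== PORT B =====
-- the scan loop of B: walks the sorted pairs with a seen set; stops at the first repeated char
def pvScanB (seen : PySem.Set Char) : List (Int × Char) → PySem.Set Char × Option Int
  | [] => (seen, none)
  | x :: t => if PySem.Set.contains seen x.2 then (seen, some x.1) else pvScanB (PySem.Set.add seen x.2) t

def maxPointsInsideSquare_alt (points : List (List Int)) (s : String) : Int :=
  let pairs := (List.zip points s.toList).map (fun pc => (pvSize pc.1, pc.2))
  let spairs := PySem.List.sorted pairs (fun x => x.1) false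
  match pvScanB PySem.Set.empty spairs with
  | (seen, none) => (PySem.Set.len seen : Int)
  | (_, some b) => (PySem.Set.len (PySem.Set.ofList ((spairs.filter (fun x => decide (x.1 < b))).map (fun x => x.2))) : Int)

-- ===== PRECONDITION & SPEC =====
-- Pre_ excludes exactly the inputs where the Pythons raise IndexError: a point paired with a
-- char (zip truncates) that has fewer than two coordinates.
def Pre_maxPointsInsideSquare (points : List (List Int)) (s : String) : Prop :=
  ∀ pc ∈ List.zip points s.toList, 2 ≤ pc.1.length
instance (points : List (List Int)) (s : String) : Decidable (Pre_maxPointsInsideSquare points s) := by unfold Pre_maxPointsInsideSquare; infer_instance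
def pvWitness_maxPointsInsideSquare : List (List Int) × String := ([[1, 2], [-3, 4], [2, 1]], "aba")

def Spec_maxPointsInsideSquare (points : List (List Int)) (s : String) (out : Int) : Prop := out = maxPointsInsideSquare_alt points s
instance (points : List (List Int)) (s : String) (out : Int) : Decidable (Spec_maxPointsInsideSquare points s out) := by unfold Spec_maxPointsInsideSquare; infer_instance

-- ===== CLAIM (what is proved, stated in full; the proofs are below) =====
def Claim_equal_maxPointsInsideSquare : Prop := ∀ (points : List (List Int)) (s : String), Dom_maxPointsInsideSquare points s → Pre_maxPointsInsideSquare points s → Spec_maxPointsInsideSquare points s (maxPointsInsideSquare points s)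

-- ===== LEMMAS AND PROOFS =====

-- min over a list of ints, valued in WithTop ℤ (⊤ = no element)
def pvListMin (xs : List Int) : WithTop ℤ := xs.foldr (fun v acc => min (v : WithTop ℤ) acc) ⊤

-- min size among occurrences of char c
def pvMinC (c : Char) (l : List (Int × Char)) : WithTop ℤ :=
  pvListMin ((l.filter (fun x => x.2 = c)).map (fun x => x.1))

-- min over ordered same-char pairs of the larger of the two sizes
def pvPairMin : List (Int × Char) → WithTop ℤ
  | [] => ⊤
  | x :: t => min (max (x.1 : WithTop ℤ) (pvMinC x.2 t)) (pvPairMin t)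

-- min size among elements whose char is in `seen`
def pvMinSeen (seen : PySem.Set Char) (l : List (Int × Char)) : WithTop ℤ :=
  pvListMin ((l.filter (fun x => PySem.Set.contains seen x.2)).map (fun x => x.1))

def pvToW : Option Int → WithTop ℤ
  | none => ⊤
  | some v => (v : WithTop ℤ)

theorem pvListMin_nil : pvListMin [] = ⊤ := rfl
theorem pvListMin_cons (v : Int) (xs : List Int) : pvListMin (v :: xs) = min (v : WithTop ℤ) (pvListMin xs) := rfl

theorem pvListMin_append (xs ys : List Int) :
    pvListMin (xs ++ ys) = min (pvListMin xs) (pvListMin ys) := by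
  induction xs with
  | nil => simp [pvListMin_nil]
  | cons v t ih => simp [pvListMin_cons, ih, min_assoc]

theorem pvListMin_lt_iff (xs : List Int) (b : WithTop ℤ) :
    pvListMin xs < b ↔ ∃ v ∈ xs, (v : WithTop ℤ) < b := by
  induction xs with
  | nil => simp [pvListMin]
  | cons v t ih => simp [pvListMin_cons, ih]

theorem le_pvListMin_iff (xs : List Int) (s : Int) :
    (s : WithTop ℤ) ≤ pvListMin xs ↔ ∀ v ∈ xs, s ≤ v := by
  induction xs with
  | nil => simp [pvListMin_nil]
  | cons v t ih => simp [pvListMin_cons, ih]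

theorem pvMinC_cons (c : Char) (x : Int × Char) (t : List (Int × Char)) :
    pvMinC c (x :: t) = if x.2 = c then min (x.1 : WithTop ℤ) (pvMinC c t) else pvMinC c t := by
  by_cases h : x.2 = c <;> simp [pvMinC, h, pvListMin_cons]

theorem pvMinC_append (c : Char) (l₁ l₂ : List (Int × Char)) :
    pvMinC c (l₁ ++ l₂) = min (pvMinC c l₁) (pvMinC c l₂) := by
  simp [pvMinC, List.filter_append, pvListMin_append]

theorem pvMinC_perm (c : Char) {l l' : List (Int × Char)} (h : l.Perm l') :
    pvMinC c l = pvMinC c l' := by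
  induction h with
  | nil => rfl
  | cons x _ ih => simp [pvMinC_cons, ih]
  | swap x y t =>
    by_cases hx : x.2 = c <;> by_cases hy : y.2 = c <;> simp [pvMinC_cons, hx, hy]
    rw [min_left_comm]
  | trans _ _ ih1 ih2 => exact ih1.trans ih2

theorem pvMinC_nil (c : Char) : pvMinC c [] = ⊤ := rfl

theorem pvMinC_singleton (c : Char) (x : Int × Char) :
    pvMinC c [x] = if x.2 = c then (x.1 : WithTop ℤ) else ⊤ := by
  by_cases h : x.2 = c <;> simp [pvMinC_cons, pvMinC_nil, h]

theorem pvPairMin_append_singleton (l : List (Int × Char)) (x : Int × Char) :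
    pvPairMin (l ++ [x]) = min (pvPairMin l) (max (x.1 : WithTop ℤ) (pvMinC x.2 l)) := by
  induction l with
  | nil => simp [pvPairMin, pvMinC_nil]
  | cons y t ih =>
    show min (max (y.1 : WithTop ℤ) (pvMinC y.2 (t ++ [x]))) (pvPairMin (t ++ [x])) = _
    rw [pvMinC_append, pvMinC_singleton, ih, pvMinC_cons]
    have hy' : pvPairMin (y :: t) = min (max (y.1 : WithTop ℤ) (pvMinC y.2 t)) (pvPairMin t) := rfl
    rw [hy']
    by_cases h : x.2 = y.2
    · have h' : y.2 = x.2 := h.symm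
      rw [if_pos h, if_pos h', h]
      rw [max_min_distrib_left, max_min_distrib_left, max_comm (x.1 : WithTop ℤ) (y.1 : WithTop ℤ)]
      simp [min_assoc, min_left_comm, min_comm]
    · have h' : ¬ (y.2 = x.2) := fun e => h e.symm
      rw [if_neg h, if_neg h']
      have htop : min (pvMinC y.2 t) ⊤ = pvMinC y.2 t := inf_top_eq _
      rw [htop]
      ac_rfl

theorem pvPairMin_perm {l l' : List (Int × Char)} (h : l.Perm l') :
    pvPairMin l = pvPairMin l' := by
  induction h with
  | nil => rfl
  | cons x h ih =>
    show min (max (x.1 : WithTop ℤ) (pvMinC x.2 _)) _ = min (max (x.1 : WithTop ℤ) (pvMinC x.2 _)) _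
    rw [ih, pvMinC_perm x.2 h]
  | swap x y t =>
    show min (max (y.1 : WithTop ℤ) (pvMinC y.2 (x :: t)))
           (min (max (x.1 : WithTop ℤ) (pvMinC x.2 t)) (pvPairMin t))
       = min (max (x.1 : WithTop ℤ) (pvMinC x.2 (y :: t)))
           (min (max (y.1 : WithTop ℤ) (pvMinC y.2 t)) (pvPairMin t))
    rw [pvMinC_cons, pvMinC_cons]
    by_cases e : x.2 = y.2
    · have e' : y.2 = x.2 := e.symm
      rw [if_pos e, if_pos e', e]
      rw [max_min_distrib_left, max_min_distrib_left, max_comm (y.1 : WithTop ℤ) (x.1 : WithTop ℤ)]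
      simp [min_assoc, min_left_comm, min_comm]
    · have e' : ¬ (y.2 = x.2) := fun q => e q.symm
      rw [if_neg e, if_neg e', min_left_comm]
  | trans _ _ ih1 ih2 => exact ih1.trans ih2

-- ===== A-side characterisation =====
def pvResA (l : List (Int × Char)) : PySem.Dict Char Int × Option Int :=
  l.foldl pvStepA (PySem.Dict.empty, none)

theorem pvMinC_eq_top_of_not_mem {c : Char} {l : List (Int × Char)} (h : c ∉ l.map Prod.snd) :
    pvMinC c l = ⊤ := by
  have : l.filter (fun x => decide (x.2 = c)) = [] := by
    rw [List.filter_eq_nil_iff]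
    intro x hx hc
    exact h (List.mem_map.mpr ⟨x, hx, by simpa using hc⟩)
  simp [pvMinC, this, pvListMin_nil]

theorem pvMinC_ne_top_of_mem {c : Char} {l : List (Int × Char)} (h : c ∈ l.map Prod.snd) :
    pvMinC c l ≠ ⊤ := by
  induction l with
  | nil => simp at h
  | cons y t ih =>
    rw [pvMinC_cons]
    by_cases hy : y.2 = c
    · rw [if_pos hy]
      intro hmin
      exact WithTop.coe_ne_top (top_le_iff.mp (hmin ▸ min_le_left _ _))
    · rw [if_neg hy]
      apply ih
      simp only [List.map_cons, List.mem_cons] at h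
      rcases h with h | h
      · exact absurd h.symm hy
      · exact h

theorem pvToW_match (o : Option Int) (v : Int) :
    pvToW (some (match o with | none => v | some sm => min v sm)) = min (v : WithTop ℤ) (pvToW o) := by
  cases o <;> simp [pvToW]

theorem pvResA_spec (l : List (Int × Char)) :
    (pvResA l).1.items = (PySem.List.dedup (l.map Prod.snd)).map
        (fun c => (c, ((pvMinC c l).getD 0 : Int))) ∧
    pvToW (pvResA l).2 = pvPairMin l := by
  induction l using List.reverseRecOn with
  | nil => constructor <;> rfl
  | append_singleton l x ih =>
    obtain ⟨h1, h2⟩ := ih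
    have hstep : pvResA (l ++ [x]) = pvStepA (pvResA l) x := by
      simp [pvResA, List.foldl_append]
    have hkeys : (pvResA l).1.keys = PySem.List.dedup (l.map Prod.snd) := by
      show (pvResA l).1.items.map Prod.fst = _
      rw [h1, List.map_map]
      have hid : (Prod.fst ∘ fun c => (c, ((pvMinC c l).getD 0 : Int))) = id := rfl
      rw [hid, List.map_id]
    have hnodup : (pvResA l).1.keys.Nodup := by
      rw [hkeys]; exact PySem.List.nodup_dedup _
    have hchars : (l ++ [x]).map Prod.snd = l.map Prod.snd ++ [x.2] := by simp
    have hpm : pvPairMin (l ++ [x]) = min (pvPairMin l) (max (x.1 : WithTop ℤ) (pvMinC x.2 l)) :=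
      pvPairMin_append_singleton l x
    by_cases hmem : x.2 ∈ l.map Prod.snd
    · -- char already present
      have hcont : (pvResA l).1.contains x.2 = true := by
        rw [PySem.Dict.contains_eq_decide_mem_keys, hkeys]
        simp [hmem]
      obtain ⟨m, hm⟩ : ∃ m : ℤ, pvMinC x.2 l = (m : WithTop ℤ) := by
        cases hmc : pvMinC x.2 l with
        | top => exact absurd hmc (pvMinC_ne_top_of_mem hmem)
        | coe m => exact ⟨m, rfl⟩
      have hmD : ((pvMinC x.2 l).getD 0 : Int) = m := by rw [hm]; rfl
      have hgetD : (pvResA l).1.getD x.2 0 = m := by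
        have hmemit : (x.2, ((pvMinC x.2 l).getD 0 : Int)) ∈ (pvResA l).1.items := by
          rw [h1]
          exact List.mem_map.mpr ⟨x.2, (PySem.List.mem_dedup _ _).mpr hmem, rfl⟩
        rw [PySem.Dict.getD_of_mem_items _ hmemit hnodup, hmD]
      have hKeq : PySem.List.dedup ((l ++ [x]).map Prod.snd) = PySem.List.dedup (l.map Prod.snd) := by
        rw [hchars]
        simp only [PySem.List.dedup_eq_ofList, PySem.Set.ofList_eq_foldl, List.foldl_append]
        rw [← PySem.Set.ofList_eq_foldl]
        show PySem.Set.add (PySem.Set.ofList (l.map Prod.snd)) x.2 = _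
        simp [PySem.Set.add, PySem.Set.contains, hmem]
      have hFother : ∀ c ∈ PySem.List.dedup (l.map Prod.snd), c ≠ x.2 →
          pvMinC c (l ++ [x]) = pvMinC c l := by
        intro c _ hc
        rw [pvMinC_append, pvMinC_singleton, if_neg (fun e => hc e.symm)]
        exact inf_top_eq _
      have hFx : pvMinC x.2 (l ++ [x]) = min (m : WithTop ℤ) (x.1 : WithTop ℤ) := by
        rw [pvMinC_append, pvMinC_singleton, if_pos rfl, hm]
      rw [hstep]
      unfold pvStepA
      rw [hcont, if_neg (by simp), hgetD]
      by_cases hlt : x.1 < m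
      · -- size < current min: dict updated, old min goes into secondMin
        simp only [if_pos hlt]
        constructor
        · rw [PySem.Dict.items_insert_of_contains _ _ hcont, h1, List.map_map, hKeq]
          apply List.map_congr_left
          intro c hcK
          by_cases hc : c = x.2
          · subst hc
            simp only [Function.comp_apply, beq_self_eq_true, if_pos]
            have : pvMinC x.2 (l ++ [x]) = (x.1 : WithTop ℤ) := by
              rw [hFx, min_eq_right (by exact_mod_cast le_of_lt hlt)]
            rw [this]; rfl
          · simp only [Function.comp_apply]
            rw [if_neg (by simpa using hc), hFother c hcK hc]
        · rw [pvToW_match, h2, hpm, hm]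
          have hmax : max (x.1 : WithTop ℤ) (m : WithTop ℤ) = (m : WithTop ℤ) :=
            max_eq_right (by exact_mod_cast le_of_lt hlt)
          rw [hmax, min_comm]
      · -- size ≥ current min: dict unchanged, size goes into secondMin
        simp only [if_neg hlt]
        constructor
        · rw [h1, hKeq]
          apply List.map_congr_left
          intro c hcK
          by_cases hc : c = x.2
          · subst hc
            have : pvMinC x.2 (l ++ [x]) = (m : WithTop ℤ) := by
              rw [hFx, min_eq_left (by exact_mod_cast le_of_not_gt hlt)]
            rw [this, hm]
          · rw [hFother c hcK hc]
        · rw [pvToW_match, h2, hpm, hm]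
          have hmax : max (x.1 : WithTop ℤ) (m : WithTop ℤ) = (x.1 : WithTop ℤ) :=
            max_eq_left (by exact_mod_cast le_of_not_gt hlt)
          rw [hmax, min_comm]
    · -- fresh char: appended to the dict, secondMin untouched
      have hcont : (pvResA l).1.contains x.2 = false := by
        rw [PySem.Dict.contains_eq_decide_mem_keys, hkeys]
        simp [hmem]
      have hKeq : PySem.List.dedup ((l ++ [x]).map Prod.snd) = PySem.List.dedup (l.map Prod.snd) ++ [x.2] := by
        rw [hchars]
        simp only [PySem.List.dedup_eq_ofList, PySem.Set.ofList_eq_foldl, List.foldl_append]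
        rw [← PySem.Set.ofList_eq_foldl]
        show PySem.Set.add (PySem.Set.ofList (l.map Prod.snd)) x.2 = _
        simp [PySem.Set.add, PySem.Set.contains, hmem]
      have htopx : pvMinC x.2 l = ⊤ := pvMinC_eq_top_of_not_mem hmem
      rw [hstep]
      unfold pvStepA
      rw [hcont, if_pos rfl]
      constructor
      · rw [PySem.Dict.items_insert_of_not_contains _ _ hcont, h1, hKeq, List.map_append]
        congr 1
        · apply List.map_congr_left
          intro c hcK
          have hc : c ≠ x.2 := by
            intro e; subst e
            exact hmem ((PySem.List.mem_dedup _ _).mp hcK)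
          rw [pvMinC_append, pvMinC_singleton, if_neg (fun e => hc e.symm)]
          rw [inf_top_eq]
        · have : pvMinC x.2 (l ++ [x]) = (x.1 : WithTop ℤ) := by
            rw [pvMinC_append, pvMinC_singleton, if_pos rfl, htopx]
            exact top_inf_eq _
          simp [this]
          rfl
      · rw [h2, hpm, htopx]
        have : max (x.1 : WithTop ℤ) ⊤ = ⊤ := max_eq_right le_top
        rw [this, inf_top_eq]

-- ===== B-side characterisation =====
theorem pvMinSeen_cons (seen : PySem.Set Char) (x : Int × Char) (t : List (Int × Char)) :
    pvMinSeen seen (x :: t) =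
      if PySem.Set.contains seen x.2 then min (x.1 : WithTop ℤ) (pvMinSeen seen t) else pvMinSeen seen t := by
  by_cases h : x.2 ∈ seen <;> simp [pvMinSeen, h, pvListMin_cons]

theorem pvMinSeen_empty (t : List (Int × Char)) : pvMinSeen PySem.Set.empty t = ⊤ := by
  induction t with
  | nil => rfl
  | cons x t ih =>
    rw [pvMinSeen_cons, ih, if_neg (by simp [PySem.Set.empty])]

theorem pvMinSeen_add {seen : PySem.Set Char} {c : Char} (hc : c ∉ seen) (t : List (Int × Char)) :
    pvMinSeen (PySem.Set.add seen c) t = min (pvMinC c t) (pvMinSeen seen t) := by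
  induction t with
  | nil => simp [pvMinSeen, pvMinC, pvListMin]
  | cons x t ih =>
    rw [pvMinSeen_cons, pvMinSeen_cons, pvMinC_cons, ih]
    by_cases hx : x.2 = c
    · rw [if_pos (show PySem.Set.contains (PySem.Set.add seen c) x.2 = true from
            (PySem.Set.contains_iff _ _).mpr ((PySem.Set.mem_add _ _ _).mpr (Or.inr hx))),
          if_pos hx,
          if_neg (show ¬ PySem.Set.contains seen x.2 = true from
            fun h => hc (hx ▸ (PySem.Set.contains_iff _ _).mp h)),
          ← min_assoc]
    · by_cases hs : x.2 ∈ seen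
      · rw [if_pos ((PySem.Set.contains_iff _ _).mpr ((PySem.Set.mem_add _ _ _).mpr (Or.inl hs))),
            if_pos ((PySem.Set.contains_iff _ _).mpr hs), if_neg hx, min_left_comm]
      · rw [if_neg (show ¬ PySem.Set.contains (PySem.Set.add seen c) x.2 = true from fun h => by
              rcases (PySem.Set.mem_add _ _ _).mp ((PySem.Set.contains_iff _ _).mp h) with h' | h'
              · exact hs h'
              · exact hx h'),
            if_neg (show ¬ PySem.Set.contains seen x.2 = true from
              fun h => hs ((PySem.Set.contains_iff _ _).mp h)), if_neg hx]

theorem pvScanB_none (seen : PySem.Set Char) (M : List (Int × Char))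
    (h : (pvScanB seen M).2 = none) :
    (pvScanB seen M).1 = PySem.Set.update seen (M.map (fun x => x.2)) := by
  induction M generalizing seen with
  | nil => rfl
  | cons x t ih =>
    rw [pvScanB] at h ⊢
    by_cases hc : PySem.Set.contains seen x.2
    · rw [if_pos hc] at h; cases h
    · rw [if_neg hc] at h ⊢
      rw [ih _ h]
      rfl

theorem le_pvMinC (c : Char) {t : List (Int × Char)} {s : Int} (h : ∀ y ∈ t, s ≤ y.1) :
    (s : WithTop ℤ) ≤ pvMinC c t := by
  rw [pvMinC, le_pvListMin_iff]
  intro v hv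
  obtain ⟨x, hx, hxv⟩ := List.mem_map.mp hv
  exact hxv ▸ h x (List.mem_of_mem_filter hx)

theorem le_pvMinSeen (seen : PySem.Set Char) {t : List (Int × Char)} {s : Int} (h : ∀ y ∈ t, s ≤ y.1) :
    (s : WithTop ℤ) ≤ pvMinSeen seen t := by
  rw [pvMinSeen, le_pvListMin_iff]
  intro v hv
  obtain ⟨x, hx, hxv⟩ := List.mem_map.mp hv
  exact hxv ▸ h x (List.mem_of_mem_filter hx)

theorem le_pvPairMin {t : List (Int × Char)} {s : Int} (h : ∀ y ∈ t, s ≤ y.1) :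
    (s : WithTop ℤ) ≤ pvPairMin t := by
  induction t with
  | nil => exact le_top
  | cons x t ih =>
    show (s : WithTop ℤ) ≤ min (max (x.1 : WithTop ℤ) (pvMinC x.2 t)) (pvPairMin t)
    refine le_min (le_max_of_le_left ?_) (ih fun y hy => h y (List.mem_cons_of_mem _ hy))
    exact_mod_cast h x List.mem_cons_self

theorem pvScanB_boundary (seen : PySem.Set Char) (M : List (Int × Char))
    (hs : M.Pairwise (fun a b => a.1 ≤ b.1)) :
    pvToW (pvScanB seen M).2 = min (pvMinSeen seen M) (pvPairMin M) := by
  induction M generalizing seen with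
  | nil => simp [pvScanB, pvToW, pvMinSeen, pvPairMin]; rfl
  | cons x t ih =>
    obtain ⟨hxle, hs'⟩ := List.pairwise_cons.mp hs
    rw [pvScanB, pvMinSeen_cons]
    have hpm : pvPairMin (x :: t) = min (max (x.1 : WithTop ℤ) (pvMinC x.2 t)) (pvPairMin t) := rfl
    by_cases hc : PySem.Set.contains seen x.2
    · rw [if_pos hc, if_pos hc, hpm]
      show (x.1 : WithTop ℤ) =
        min (min (x.1 : WithTop ℤ) (pvMinSeen seen t))
          (min (max (x.1 : WithTop ℤ) (pvMinC x.2 t)) (pvPairMin t))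
      rw [min_eq_left (le_pvMinSeen seen hxle),
          min_eq_left (le_min (le_max_left _ _) (le_pvPairMin hxle))]
    · rw [if_neg hc, if_neg hc, ih _ hs']
      have hcm : x.2 ∉ seen := fun h => hc ((PySem.Set.contains_iff _ _).mpr h)
      rw [pvMinSeen_add hcm, hpm]
      have hmax : max (x.1 : WithTop ℤ) (pvMinC x.2 t) = pvMinC x.2 t :=
        max_eq_right (le_pvMinC x.2 hxle)
      rw [hmax]
      simp [min_left_comm, min_comm]

-- ===== assembly =====
theorem pvMinC_lt_iff (c : Char) (l : List (Int × Char)) (b : Int) :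
    pvMinC c l < (b : WithTop ℤ) ↔ ∃ x ∈ l, x.2 = c ∧ x.1 < b := by
  rw [pvMinC, pvListMin_lt_iff]
  constructor
  · rintro ⟨v, hv, hlt⟩
    obtain ⟨x, hx, rfl⟩ := List.mem_map.mp hv
    exact ⟨x, List.mem_of_mem_filter hx, by simpa using List.of_mem_filter hx, by exact_mod_cast hlt⟩
  · rintro ⟨x, hx, hc, hlt⟩
    exact ⟨x.1, List.mem_map.mpr ⟨x, List.mem_filter.mpr ⟨hx, by simp [hc]⟩, rfl⟩, by exact_mod_cast hlt⟩

theorem pvA_count (l : List (Int × Char)) :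
    ((pvResA l).1.values.foldl
        (fun cnt v => if pvLtInf v (pvResA l).2 then cnt + 1 else cnt) (0 : Int))
    = ((PySem.List.dedup (l.map Prod.snd)).countP
        (fun c => decide (pvMinC c l < pvPairMin l)) : Int) := by
  obtain ⟨h1, h2⟩ := pvResA_spec l
  have hval : (pvResA l).1.values = (PySem.List.dedup (l.map Prod.snd)).map
      (fun c => ((pvMinC c l).getD 0 : Int)) := by
    show (pvResA l).1.items.map Prod.snd = _
    rw [h1, List.map_map]
    rfl
  rw [hval, PySem.List.foldl_count_if, zero_add, List.countP_map]
  congr 1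
  apply List.countP_congr
  intro c hcK
  have hmem : c ∈ l.map Prod.snd := (PySem.List.mem_dedup _ _).mp hcK
  obtain ⟨m, hm⟩ : ∃ m : ℤ, pvMinC c l = (m : WithTop ℤ) := by
    cases hmc : pvMinC c l with
    | top => exact absurd hmc (pvMinC_ne_top_of_mem hmem)
    | coe m => exact ⟨m, rfl⟩
  simp only [Function.comp_apply]
  have hbool : pvLtInf ((pvMinC c l).getD 0) (pvResA l).2 = decide (pvMinC c l < pvPairMin l) := by
    rw [hm]
    cases hsm : (pvResA l).2 with
    | none =>
      have htop : pvPairMin l = ⊤ := by rw [← h2, hsm]; rfl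
      simp [pvLtInf, htop, WithTop.coe_lt_top]
    | some b =>
      have hcb : pvPairMin l = (b : WithTop ℤ) := by rw [← h2, hsm]; rfl
      simp [pvLtInf, hcb, WithTop.coe_lt_coe]
      rfl
  rw [hbool]

theorem pv_main (l : List (Int × Char)) :
    (l.foldl (fun acc x => pvStepA acc x) (PySem.Dict.empty, none)
      |> fun st => st.1.values.foldl (fun cnt v => if pvLtInf v st.2 then cnt + 1 else cnt) (0 : Int))
    = (match pvScanB PySem.Set.empty (PySem.List.sorted l (fun x => x.1) false) with
       | (seen, none) => (PySem.Set.len seen : Int)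
       | (_, some b) => (PySem.Set.len (PySem.Set.ofList (((PySem.List.sorted l (fun x => x.1) false).filter (fun x => decide (x.1 < b))).map (fun x => x.2))) : Int)) := by
  have hA : (l.foldl (fun acc x => pvStepA acc x) (PySem.Dict.empty, none)
      |> fun st => st.1.values.foldl (fun cnt v => if pvLtInf v st.2 then cnt + 1 else cnt) (0 : Int))
      = ((PySem.List.dedup (l.map Prod.snd)).countP
          (fun c => decide (pvMinC c l < pvPairMin l)) : Int) := pvA_count l
  rw [hA]
  have hperm : (PySem.List.sorted l (fun x => x.1) false).Perm l := PySem.List.sorted_perm l _ false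
  have hpw : (PySem.List.sorted l (fun x => x.1) false).Pairwise (fun a b => a.1 ≤ b.1) :=
    PySem.List.sorted_pairwise l _
  have hb : pvToW (pvScanB PySem.Set.empty (PySem.List.sorted l (fun x => x.1) false)).2 = pvPairMin l := by
    rw [pvScanB_boundary _ _ hpw, pvMinSeen_empty, pvPairMin_perm hperm]
    exact top_inf_eq _
  rcases hsc : pvScanB PySem.Set.empty (PySem.List.sorted l (fun x => x.1) false) with ⟨seen, bd⟩
  rw [hsc] at hb
  cases bd with
  | none =>
    have htop : pvPairMin l = ⊤ := by rw [← hb]; rfl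
    have hseen : seen = PySem.Set.ofList ((PySem.List.sorted l (fun x => x.1) false).map (fun x => x.2)) := by
      have := pvScanB_none PySem.Set.empty (PySem.List.sorted l (fun x => x.1) false) (by rw [hsc])
      rw [hsc] at this
      exact this.trans (PySem.Set.update_empty _)
    show ((PySem.List.dedup (l.map Prod.snd)).countP _ : Int) = PySem.Set.len seen
    have hall : (PySem.List.dedup (l.map Prod.snd)).countP
        (fun c => decide (pvMinC c l < pvPairMin l)) = (PySem.List.dedup (l.map Prod.snd)).length := by
      apply List.countP_eq_length.mpr
      intro c hc
      rw [htop]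
      simpa using lt_top_iff_ne_top.mpr
        (pvMinC_ne_top_of_mem ((PySem.List.mem_dedup _ _).mp hc))
    rw [hall, hseen]
    have hp : (PySem.Set.ofList ((PySem.List.sorted l (fun x => x.1) false).map (fun x => x.2))).Perm
        (PySem.List.dedup (l.map Prod.snd)) := by
      rw [List.perm_ext_iff_of_nodup (PySem.Set.nodup_ofList _) (PySem.List.nodup_dedup _)]
      intro c
      rw [PySem.Set.mem_ofList, PySem.List.mem_dedup]
      constructor
      · rintro h
        obtain ⟨x, hx, rfl⟩ := List.mem_map.mp h
        exact List.mem_map.mpr ⟨x, hperm.mem_iff.mp hx, rfl⟩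
      · rintro h
        obtain ⟨x, hx, rfl⟩ := List.mem_map.mp h
        exact List.mem_map.mpr ⟨x, hperm.mem_iff.mpr hx, rfl⟩
    show ((PySem.List.dedup (l.map Prod.snd)).length : Int) = _
    rw [← hp.length_eq]
    rfl
  | some b =>
    have hcb : pvPairMin l = (b : WithTop ℤ) := by rw [← hb]; rfl
    show ((PySem.List.dedup (l.map Prod.snd)).countP _ : Int)
        = (PySem.Set.len (PySem.Set.ofList (((PySem.List.sorted l (fun x => x.1) false).filter (fun x => decide (x.1 < b))).map (fun x => x.2))) : Int)
    rw [List.countP_eq_length_filter]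
    have hp : (PySem.Set.ofList (((PySem.List.sorted l (fun x => x.1) false).filter (fun x => decide (x.1 < b))).map (fun x => x.2))).Perm
        ((PySem.List.dedup (l.map Prod.snd)).filter (fun c => decide (pvMinC c l < pvPairMin l))) := by
      rw [List.perm_ext_iff_of_nodup (PySem.Set.nodup_ofList _)
            ((PySem.List.nodup_dedup _).filter _)]
      intro c
      rw [PySem.Set.mem_ofList, List.mem_filter, PySem.List.mem_dedup]
      constructor
      · rintro h
        obtain ⟨x, hx, rfl⟩ := List.mem_map.mp h
        obtain ⟨hxl, hxb⟩ := List.mem_filter.mp hx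
        refine ⟨List.mem_map.mpr ⟨x, hperm.mem_iff.mp hxl, rfl⟩, ?_⟩
        rw [hcb]
        simpa using (pvMinC_lt_iff x.2 l b).mpr ⟨x, hperm.mem_iff.mp hxl, rfl, by simpa using hxb⟩
      · rintro ⟨hmem, hlt⟩
        rw [hcb] at hlt
        obtain ⟨x, hxl, hxc, hxb⟩ := (pvMinC_lt_iff c l b).mp (by simpa using hlt)
        exact List.mem_map.mpr ⟨x, List.mem_filter.mpr ⟨hperm.mem_iff.mpr hxl, by simpa using hxb⟩, hxc⟩
    show (((PySem.List.dedup (l.map Prod.snd)).filter _).length : Int) = _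
    rw [← hp.length_eq]
    rfl

-- ===== VERDICT (by name: the statement is the Claim_ definition above) =====
theorem maxPointsInsideSquare_spec : Claim_equal_maxPointsInsideSquare := by
  intro points s _ _
  unfold Spec_maxPointsInsideSquare maxPointsInsideSquare maxPointsInsideSquare_alt
  have h := pv_main ((List.zip points s.toList).map (fun pc => (pvSize pc.1, pc.2)))
  simpa [List.foldl_map] using h
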